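-- pv_equiv track=rewrite | github.com/DANU011/CodingTest | DANU/python/13417.py | word_rearrange
-- ===== SOURCE A (Python) =====
-- from collections import deque
--
-- def word_rearrange(num, card):
--     word = deque([card[0]])
--
--     for i in card[1:]:
--         if i > word[0]:
--             word.append(i)
--         else:
--             word.appendleft(i)
--
--     return ''.join(word)
-- ===== SOURCE B (Python) =====
-- def word_rearrange(num, card):
--     lefts = [x for j, x in enumerate(card[1:], 1) if x <= min(card[:j])]
--     rights = [x for j, x in enumerate(card[1:], 1) if x > min(card[:j])]
--     return ''.join(reversed(lefts)) + card[0] + ''.join(rights)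
-- ===== Notes on version B (the rewrite author's own statement) =====
-- stated objective: alternative
-- what changed: Replaces A's stateful deque simulation by a stateless characterization: card[j] goes to the front iff card[j] <= min(card[:j]) (it becomes a new prefix minimum), so B builds the two halves with filter comprehensions over enumerate and joins them once.
import Mathlib
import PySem

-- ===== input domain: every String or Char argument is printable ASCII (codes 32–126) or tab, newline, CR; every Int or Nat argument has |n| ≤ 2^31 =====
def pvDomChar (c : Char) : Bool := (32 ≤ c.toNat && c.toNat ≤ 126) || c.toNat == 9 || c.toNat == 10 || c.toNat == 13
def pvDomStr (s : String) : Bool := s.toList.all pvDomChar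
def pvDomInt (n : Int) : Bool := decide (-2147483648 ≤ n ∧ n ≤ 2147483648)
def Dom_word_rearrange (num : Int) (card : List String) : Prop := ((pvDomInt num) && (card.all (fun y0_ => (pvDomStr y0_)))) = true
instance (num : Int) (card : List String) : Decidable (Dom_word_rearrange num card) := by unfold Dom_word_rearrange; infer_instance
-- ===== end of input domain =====

-- B drops A's deque simulation entirely: it classifies each card[j] (j ≥ 1) by the
-- stateless property 'card[j] <= min(card[:j])' (goes to the front) vs '> min(card[:j])'
-- (goes to the back) and assembles the answer once; alternative algorithm, no speed claim.

-- ===== PORT A =====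
-- word = deque([card[0]]); for i in card[1:]: append / appendleft by i > word[0]; ''.join(word)
def word_rearrange (num : Int) (card : List String) : String :=
  match card with
  | [] => ""  -- card[0] raises IndexError in Python; excluded by Pre_
  | c0 :: rest =>
    let word := rest.foldl (fun w i => if w.headD "" < i then w ++ [i] else i :: w) [c0]
    PySem.Str.join "" word

-- ===== PORT B =====
-- lefts  = [x for j, x in enumerate(card[1:], 1) if x <= min(card[:j])]
-- rights = [x for j, x in enumerate(card[1:], 1) if x > min(card[:j])]
-- return ''.join(reversed(lefts)) + card[0] + ''.join(rights)
def word_rearrange_alt (num : Int) (card : List String) : String :=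
  let pairs := PySem.List.enumerate (PySem.List.slice card (some 1) none) 1
  -- min(card[:j]) with j ≥ 1 and card[j] existing: the slice is nonempty, so the
  -- '.getD ""' default of PySem.List.min? is never consulted on those inputs
  let lefts := (pairs.filter (fun p =>
      decide (p.2 ≤ (PySem.List.min? (PySem.List.slice card none (some p.1)) (fun y => y)).getD ""))).map (·.2)
  let rights := (pairs.filter (fun p =>
      decide ((PySem.List.min? (PySem.List.slice card none (some p.1)) (fun y => y)).getD "" < p.2))).map (·.2)
  PySem.Str.join "" lefts.reverse ++ (PySem.List.pyGet? card 0).getD "" ++ PySem.Str.join "" rights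
  -- card[0]: on the empty list Python raises IndexError (excluded by Pre_); pyGet? is exact elsewhere

-- ===== PRECONDITION & SPEC =====
-- Pre_ excludes only the empty list, on which both Pythons raise IndexError at card[0].
def Pre_word_rearrange (num : Int) (card : List String) : Prop := card ≠ []
instance (num : Int) (card : List String) : Decidable (Pre_word_rearrange num card) := by
  unfold Pre_word_rearrange; infer_instance
def pvWitness_word_rearrange : Int × List String := (3, ["ba", "ab", "cc"])
def Spec_word_rearrange (num : Int) (card : List String) (out : String) : Prop := out = word_rearrange_alt num card
instance (num : Int) (card : List String) (out : String) : Decidable (Spec_word_rearrange num card out) := by unfold Spec_word_rearrange; infer_instance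

-- ===== CLAIM (what is proved, stated in full; the proofs are below) =====
def Claim_equal_word_rearrange : Prop := ∀ (num : Int) (card : List String), Dom_word_rearrange num card → Pre_word_rearrange num card → Spec_word_rearrange num card (word_rearrange num card)

-- ===== LEMMAS AND PROOFS =====

-- Proof-only recursive characterisation of the two halves: scanning rest with the
-- running minimum cur of the already-seen prefix, x goes left iff x ≤ cur.
def leftsOf (cur : String) : List String → List String
  | [] => []
  | x :: xs => if cur < x then leftsOf cur xs else x :: leftsOf (min cur x) xs

def rightsOf (cur : String) : List String → List String
  | [] => []
  | x :: xs => if cur < x then x :: rightsOf cur xs else rightsOf (min cur x) xs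

theorem join_nil_flatten (parts : List (List Char)) : PySem.Chars.join [] parts = parts.flatten := by
  induction parts with
  | nil => rfl
  | cons h t ih =>
    cases t with
    | nil => simp [PySem.Chars.join, List.intercalate]
    | cons h2 t2 =>
      simp_all [PySem.Chars.join, List.intercalate, List.intersperse]

theorem join_split (l r : List String) (c0 : String) :
    PySem.Str.join "" (l ++ c0 :: r) = PySem.Str.join "" l ++ c0 ++ PySem.Str.join "" r := by
  apply String.toList_injective
  simp [PySem.Str.join, join_nil_flatten]

-- Loop invariant for A: the deque is always lefts.reverse ++ c0 :: rights with front cur,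
-- and the still-unprocessed suffix contributes leftsOf/rightsOf of the current minimum.
theorem loop_inv (rest : List String) :
    ∀ (lefts rights : List String) (c0 cur : String),
      (lefts.reverse ++ c0 :: rights).headD "" = cur →
      rest.foldl (fun w i => if w.headD "" < i then w ++ [i] else i :: w)
          (lefts.reverse ++ c0 :: rights) =
        (lefts ++ leftsOf cur rest).reverse ++ c0 :: (rights ++ rightsOf cur rest) := by
  induction rest with
  | nil => intro lefts rights c0 cur _; simp [leftsOf, rightsOf]
  | cons x xs ih =>
    intro lefts rights c0 cur hcur
    simp only [List.foldl_cons, hcur]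
    by_cases hx : cur < x
    · simp only [hx, if_pos, leftsOf, rightsOf]
      have h1 : lefts.reverse ++ c0 :: rights ++ [x] =
          lefts.reverse ++ c0 :: (rights ++ [x]) := by simp
      rw [h1, ih lefts (rights ++ [x]) c0 cur (by
        cases h2 : lefts.reverse with
        | nil => simp_all
        | cons a t => simp_all)]
      simp
    · simp only [hx, if_false, leftsOf, rightsOf]
      have hmin : min cur x = x := min_eq_right (le_of_not_gt hx)
      have h1 : x :: (lefts.reverse ++ c0 :: rights) =
          (lefts ++ [x]).reverse ++ c0 :: rights := by simp
      rw [h1, ih (lefts ++ [x]) rights c0 x (by simp), hmin]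
      simp

-- The running minimum of a nonempty prefix p0 :: pt, as Python's min() computes it.
theorem min?_val (p0 : String) (pt : List String) :
    (PySem.List.min? (p0 :: pt) (fun y => y)).getD "" = pt.foldl min p0 := by
  rw [PySem.List.min?_id_cons]; rfl

-- B's filter over enumerate, scanned against a growing explicit prefix, computes leftsOf.
theorem filt_left (rest : List String) :
    ∀ (p0 : String) (pt : List String),
      (((PySem.List.enumerate rest ((p0 :: pt).length : Int)).filter (fun p =>
          decide (p.2 ≤ (PySem.List.min? (PySem.List.slice ((p0 :: pt) ++ rest) none (some p.1)) (fun y => y)).getD ""))).map (·.2))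
        = leftsOf (pt.foldl min p0) rest := by
  induction rest with
  | nil => intro p0 pt; simp [PySem.List.enumerate, leftsOf]
  | cons x xs ih =>
    intro p0 pt
    have hsl : PySem.List.slice ((p0 :: pt) ++ x :: xs) none (some (((p0 :: pt).length : Nat) : Int))
        = p0 :: pt := by
      rw [PySem.List.slice_to_natCast]; simp
    rw [PySem.List.enumerate_cons, List.filter_cons]
    have hx := ih p0 (pt ++ [x])
    have hlen : (((p0 :: pt).length : Int) + 1) = (((p0 :: (pt ++ [x])).length : Nat) : Int) := by
      simp
    have happ : (p0 :: pt) ++ x :: xs = (p0 :: (pt ++ [x])) ++ xs := by simp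
    by_cases hc : (pt.foldl min p0) < x
    · have hcond : ¬ (x ≤ (PySem.List.min? (PySem.List.slice ((p0 :: pt) ++ x :: xs) none (some ((p0 :: pt).length : Int))) (fun y => y)).getD "") := by
        rw [hsl, min?_val]; exact not_le_of_gt hc
      simp only [hcond, decide_false, Bool.false_eq_true, if_false]
      rw [hlen, happ, hx, leftsOf]
      simp only [hc, if_true]
      simp [List.foldl_append, min_eq_left (le_of_lt hc)]
    · have hcond : (x ≤ (PySem.List.min? (PySem.List.slice ((p0 :: pt) ++ x :: xs) none (some ((p0 :: pt).length : Int))) (fun y => y)).getD "") := by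
        rw [hsl, min?_val]; exact le_of_not_gt hc
      simp only [hcond, decide_true, if_true, List.map_cons]
      rw [hlen, happ, hx, leftsOf]
      simp only [hc, if_false]
      simp [List.foldl_append]

theorem filt_right (rest : List String) :
    ∀ (p0 : String) (pt : List String),
      (((PySem.List.enumerate rest ((p0 :: pt).length : Int)).filter (fun p =>
          decide ((PySem.List.min? (PySem.List.slice ((p0 :: pt) ++ rest) none (some p.1)) (fun y => y)).getD "" < p.2))).map (·.2))
        = rightsOf (pt.foldl min p0) rest := by
  induction rest with
  | nil => intro p0 pt; simp [PySem.List.enumerate, rightsOf]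
  | cons x xs ih =>
    intro p0 pt
    have hsl : PySem.List.slice ((p0 :: pt) ++ x :: xs) none (some (((p0 :: pt).length : Nat) : Int))
        = p0 :: pt := by
      rw [PySem.List.slice_to_natCast]; simp
    rw [PySem.List.enumerate_cons, List.filter_cons]
    have hx := ih p0 (pt ++ [x])
    have hlen : (((p0 :: pt).length : Int) + 1) = (((p0 :: (pt ++ [x])).length : Nat) : Int) := by
      simp
    have happ : (p0 :: pt) ++ x :: xs = (p0 :: (pt ++ [x])) ++ xs := by simp
    by_cases hc : (pt.foldl min p0) < x
    · have hcond : ((PySem.List.min? (PySem.List.slice ((p0 :: pt) ++ x :: xs) none (some ((p0 :: pt).length : Int))) (fun y => y)).getD "" < x) := by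
        rw [hsl, min?_val]; exact hc
      simp only [hcond, decide_true, if_true, List.map_cons]
      rw [hlen, happ, hx, rightsOf]
      simp only [hc, if_true]
      simp [List.foldl_append, min_eq_left (le_of_lt hc)]
    · have hcond : ¬ ((PySem.List.min? (PySem.List.slice ((p0 :: pt) ++ x :: xs) none (some ((p0 :: pt).length : Int))) (fun y => y)).getD "" < x) := by
        rw [hsl, min?_val]; exact hc
      simp only [hcond, decide_false, Bool.false_eq_true, if_false]
      rw [hlen, happ, hx, rightsOf]
      simp only [hc, if_false]
      simp [List.foldl_append]

-- ===== VERDICT (by name: the statement is the Claim_ definition above) =====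
theorem word_rearrange_spec : Claim_equal_word_rearrange := by
  intro num card _ hpre
  unfold Spec_word_rearrange word_rearrange word_rearrange_alt
  match card with
  | [] => exact absurd rfl hpre
  | c0 :: rest =>
    simp only
    have hA := loop_inv rest [] [] c0 c0 (by simp)
    simp only [List.reverse_nil, List.nil_append] at hA
    have hL := filt_left rest c0 []
    have hR := filt_right rest c0 []
    simp only [List.length_cons, List.length_nil, List.foldl_nil, List.singleton_append,
      zero_add, Nat.cast_one] at hL hR
    rw [hA, join_split]
    have hrest : PySem.List.slice (c0 :: rest) (some 1) none = rest := by
      rw [PySem.List.slice_from_one]; rfl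
    have hget : (PySem.List.pyGet? (c0 :: rest) 0).getD "" = c0 := by
      simp [PySem.List.pyGet?, PySem.List.pyIdx?]
    rw [hrest, hget]
    norm_cast at hL hR
    rw [← hL, ← hR]
    rfl
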